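-- pv_equiv track=rewrite | github.com/cakama3a/GloomHavenUa | scratch/capitalize.py | clean_nested_nobr
-- ===== SOURCE A (Python) =====
-- def clean_nested_nobr(text):
--     # If text has <nobr>...<nobr>...</nobr>...</nobr>
--     # We can just iterate through and keep only the first level of <nobr>
--     result = []
--     level = 0
--     i = 0
--     while i < len(text):
--         if text[i:i+6] == '<nobr>':
--             if level == 0:
--                 result.append('<nobr>')
--             level += 1
--             i += 6
--         elif text[i:i+7] == '</nobr>':
--             level = max(0, level - 1)
--             if level == 0:
--                 result.append('</nobr>')
--             i += 7
--         else:
--             result.append(text[i])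
--             i += 1
--     return ''.join(result)
-- ===== SOURCE B (Python) =====
-- def clean_nested_nobr(text):
--     # Jump between tag occurrences with str.find, copying plain-text chunks
--     # wholesale, instead of scanning character by character.
--     out = []
--     level = 0
--     rest = text
--     while True:
--         o = rest.find('<nobr>')
--         c = rest.find('</nobr>')
--         if o == -1 and c == -1:
--             out.append(rest)
--             break
--         if c == -1 or (o != -1 and o < c):
--             out.append(rest[:o])
--             if level == 0:
--                 out.append('<nobr>')
--             level += 1
--             rest = rest[o + 6:]
--         else:
--             out.append(rest[:c])
--             level = max(0, level - 1)
--             if level == 0: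
--                 out.append('</nobr>')
--             rest = rest[c + 7:]
--     return ''.join(out)
-- ===== Notes on version B (the rewrite author's own statement) =====
-- stated objective: faster
-- what changed: Replaces A's character-by-character index scan (one Python-level iteration and append per character) with str.find jumps to the next tag occurrence, slicing each plain-text chunk out wholesale; the level counter logic is kept.
import Mathlib
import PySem

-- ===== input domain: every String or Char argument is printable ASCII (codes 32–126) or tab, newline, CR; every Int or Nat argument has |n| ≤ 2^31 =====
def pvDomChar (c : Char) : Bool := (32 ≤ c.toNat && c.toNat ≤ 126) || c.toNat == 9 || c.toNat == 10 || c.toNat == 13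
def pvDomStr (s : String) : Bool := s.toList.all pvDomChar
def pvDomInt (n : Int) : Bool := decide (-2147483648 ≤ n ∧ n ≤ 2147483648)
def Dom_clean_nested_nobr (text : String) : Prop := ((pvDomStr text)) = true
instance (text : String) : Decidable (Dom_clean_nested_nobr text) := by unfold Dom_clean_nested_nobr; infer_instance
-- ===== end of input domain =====

-- B replaces A's character-by-character index scan by str.find jumps between tag
-- occurrences, copying the plain-text chunks between tags wholesale (alternative decomposition).

-- ===== PORT A =====
def nobrOpen : List Char := ['<', 'n', 'o', 'b', 'r', '>']
def nobrClose : List Char := ['<', '/', 'n', 'o', 'b', 'r', '>']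

-- A's while-loop over the index i, as structural recursion on the suffix text[i:];
-- `text[i:i+6] == '<nobr>'` is exactly `(suffix).take 6 = nobrOpen`.
def cleanLoopA : List Char → Nat → List Char
  | [], _ => []
  | c :: cs, level =>
    if (c :: cs).take 6 = nobrOpen then
      (if level = 0 then nobrOpen else []) ++ cleanLoopA ((c :: cs).drop 6) (level + 1)
    else if (c :: cs).take 7 = nobrClose then
      -- level = max(0, level - 1) is Nat subtraction
      (if level - 1 = 0 then nobrClose else []) ++ cleanLoopA ((c :: cs).drop 7) (level - 1)
    else
      c :: cleanLoopA cs level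
  termination_by cs _ => cs.length
  decreasing_by all_goals simp

def clean_nested_nobr (text : String) : String := String.ofList (cleanLoopA text.toList 0)

-- ===== PORT B =====
-- B's while-True loop over `rest`, as recursion on rest; rest.find(tag) is
-- PySem.Chars.find; in the branches where it is taken, o (resp. c) is ≥ 0, so the
-- Python slices rest[:o] / rest[o+6:] are exactly take/drop.
def cleanLoopB (rest : List Char) (level : Nat) : List Char :=
  -- Python binds o = rest.find('<nobr>') and c = rest.find('</nobr>') once per
  -- iteration; the bound values are written out inline here.
  if h1 : PySem.Chars.find rest nobrOpen = -1 ∧ PySem.Chars.find rest nobrClose = -1 then rest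
  else if h2 : PySem.Chars.find rest nobrClose = -1 ∨
      (¬ PySem.Chars.find rest nobrOpen = -1 ∧
        PySem.Chars.find rest nobrOpen < PySem.Chars.find rest nobrClose) then
    rest.take (PySem.Chars.find rest nobrOpen).toNat ++ (if level = 0 then nobrOpen else []) ++
      cleanLoopB (rest.drop ((PySem.Chars.find rest nobrOpen).toNat + 6)) (level + 1)
  else
    rest.take (PySem.Chars.find rest nobrClose).toNat ++ (if level - 1 = 0 then nobrClose else []) ++
      cleanLoopB (rest.drop ((PySem.Chars.find rest nobrClose).toNat + 7)) (level - 1)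
  termination_by rest.length
  decreasing_by
  · have ho : ¬ PySem.Chars.find rest nobrOpen = -1 := by
      rcases h2 with h | h
      exacts [fun ho => h1 ⟨ho, h⟩, h.1]
    have hinf : nobrOpen <:+: rest := (PySem.Chars.find_ne_neg_one_iff rest nobrOpen).1 ho
    have := hinf.length_le
    simp [nobrOpen] at this ⊢; omega
  · have hc : ¬ PySem.Chars.find rest nobrClose = -1 := fun hc => h2 (Or.inl hc)
    have hinf : nobrClose <:+: rest := (PySem.Chars.find_ne_neg_one_iff rest nobrClose).1 hc
    have := hinf.length_le
    simp [nobrClose] at this ⊢; omega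

def clean_nested_nobr_alt (text : String) : String := String.ofList (cleanLoopB text.toList 0)

-- ===== PRECONDITION & SPEC =====
def Spec_clean_nested_nobr (text : String) (out : String) : Prop := out = clean_nested_nobr_alt text
instance (text : String) (out : String) : Decidable (Spec_clean_nested_nobr text out) := by unfold Spec_clean_nested_nobr; infer_instance

-- ===== CLAIM (what is proved, stated in full; the proofs are below) =====
def Claim_equal_clean_nested_nobr : Prop := ∀ (text : String), Dom_clean_nested_nobr text → Spec_clean_nested_nobr text (clean_nested_nobr text)

-- ===== LEMMAS AND PROOFS =====

theorem take_eq_iff_prefix_open (cs : List Char) : cs.take 6 = nobrOpen ↔ nobrOpen <+: cs := by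
  constructor
  · intro h; exact h ▸ List.take_prefix 6 cs
  · intro h
    have := (List.prefix_iff_eq_take.1 h).symm
    simpa [nobrOpen] using this

theorem take_eq_iff_prefix_close (cs : List Char) : cs.take 7 = nobrClose ↔ nobrClose <+: cs := by
  constructor
  · intro h; exact h ▸ List.take_prefix 7 cs
  · intro h
    have := (List.prefix_iff_eq_take.1 h).symm
    simpa [nobrClose] using this

-- A copies verbatim while no tag occurs at the current position.
theorem cleanLoopA_skip (p : Nat) (cs : List Char) (level : Nat)
    (h : ∀ j, j < p → ¬ nobrOpen <+: cs.drop j ∧ ¬ nobrClose <+: cs.drop j) :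
    cleanLoopA cs level = cs.take p ++ cleanLoopA (cs.drop p) level := by
  induction p generalizing cs with
  | zero => simp
  | succ p ih =>
    cases cs with
    | nil => simp [cleanLoopA]
    | cons c cs =>
      have h0 := h 0 (Nat.succ_pos p)
      simp only [List.drop_zero] at h0
      rw [cleanLoopA]
      rw [if_neg (fun hh => h0.1 ((take_eq_iff_prefix_open _).1 hh)),
          if_neg (fun hh => h0.2 ((take_eq_iff_prefix_close _).1 hh))]
      have := ih cs (fun j hj => by simpa using h (j + 1) (Nat.succ_lt_succ hj))
      simp [this]

theorem cleanLoopA_open (t : List Char) (level : Nat) :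
    cleanLoopA (nobrOpen ++ t) level
      = (if level = 0 then nobrOpen else []) ++ cleanLoopA t (level + 1) := by
  show cleanLoopA ('<' :: 'n' :: 'o' :: 'b' :: 'r' :: '>' :: t) level = _
  rw [cleanLoopA]
  simp [nobrOpen]

theorem cleanLoopA_close (t : List Char) (level : Nat) :
    cleanLoopA (nobrClose ++ t) level
      = (if level - 1 = 0 then nobrClose else []) ++ cleanLoopA t (level - 1) := by
  show cleanLoopA ('<' :: '/' :: 'n' :: 'o' :: 'b' :: 'r' :: '>' :: t) level = _
  rw [cleanLoopA]
  simp [nobrOpen, nobrClose]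

-- A is the identity when neither tag occurs anywhere.
theorem cleanLoopA_id (cs : List Char) (level : Nat)
    (ho : ¬ nobrOpen <:+: cs) (hc : ¬ nobrClose <:+: cs) :
    cleanLoopA cs level = cs := by
  induction cs with
  | nil => simp [cleanLoopA]
  | cons c cs ih =>
    rw [cleanLoopA]
    rw [if_neg (fun hh => ho ((take_eq_iff_prefix_open _).1 hh).isInfix),
        if_neg (fun hh => hc ((take_eq_iff_prefix_close _).1 hh).isInfix)]
    rw [ih (fun h => ho (h.trans (List.suffix_cons c cs).isInfix))
        (fun h => hc (h.trans (List.suffix_cons c cs).isInfix))]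

theorem not_prefix_drop_of_not_infix (sub cs : List Char) (j : Nat) (h : ¬ sub <:+: cs) :
    ¬ sub <+: cs.drop j :=
  fun hp => h (hp.isInfix.trans (List.drop_suffix j cs).isInfix)

theorem cleanLoopB_eq (rest : List Char) (level : Nat) :
    cleanLoopB rest level = cleanLoopA rest level := by
  induction rest, level using cleanLoopB.induct with
  | case1 rest level h1 =>
    rw [cleanLoopB]; simp only [dif_pos h1]
    exact (cleanLoopA_id rest level
      ((PySem.Chars.find_eq_neg_one_iff rest nobrOpen).1 h1.1)
      ((PySem.Chars.find_eq_neg_one_iff rest nobrClose).1 h1.2)).symm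
  | case2 rest level h1 h2 ih =>
    rw [cleanLoopB]; simp only [dif_neg h1, dif_pos h2]
    have ho : ¬ PySem.Chars.find rest nobrOpen = -1 := by
      rcases h2 with h | h
      exacts [fun ho => h1 ⟨ho, h⟩, h.1]
    have ho0 : 0 ≤ PySem.Chars.find rest nobrOpen := by
      have := PySem.Chars.neg_one_le_find rest nobrOpen
      omega
    obtain ⟨hpre, hmin⟩ := PySem.Chars.find_spec (s := rest) (sub := nobrOpen) ho0
    have hskip : ∀ j, j < (PySem.Chars.find rest nobrOpen).toNat → ¬ nobrOpen <+: rest.drop j ∧ ¬ nobrClose <+: rest.drop j := by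
      intro j hj
      refine ⟨hmin j hj, ?_⟩
      rcases h2 with hcn | ⟨_, hoc⟩
      · exact not_prefix_drop_of_not_infix _ _ _
          ((PySem.Chars.find_eq_neg_one_iff rest nobrClose).1 hcn)
      · have hc0 : 0 ≤ PySem.Chars.find rest nobrClose := by
          have := PySem.Chars.neg_one_le_find rest nobrClose
          omega
        obtain ⟨_, hminc⟩ := PySem.Chars.find_spec (s := rest) (sub := nobrClose) hc0
        exact hminc j (by omega)
    obtain ⟨t, ht⟩ := hpre
    have hdrop6 : rest.drop ((PySem.Chars.find rest nobrOpen).toNat + 6) = t := by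
      have h6 : (rest.drop (PySem.Chars.find rest nobrOpen).toNat).drop 6 = t := by
        rw [← ht]; simp [nobrOpen]
      simpa [List.drop_drop, Nat.add_comm] using h6
    rw [cleanLoopA_skip (PySem.Chars.find rest nobrOpen).toNat rest level hskip]
    rw [show rest.drop (PySem.Chars.find rest nobrOpen).toNat = nobrOpen ++ t from ht.symm,
        cleanLoopA_open, ih, hdrop6, List.append_assoc]
  | case3 rest level h1 h2 ih =>
    rw [cleanLoopB]; simp only [dif_neg h1, dif_neg h2]
    have hc : ¬ PySem.Chars.find rest nobrClose = -1 := fun hc => h2 (Or.inl hc)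
    have hc0 : 0 ≤ PySem.Chars.find rest nobrClose := by
      have := PySem.Chars.neg_one_le_find rest nobrClose
      omega
    obtain ⟨hpre, hmin⟩ := PySem.Chars.find_spec (s := rest) (sub := nobrClose) hc0
    have hskip : ∀ j, j < (PySem.Chars.find rest nobrClose).toNat → ¬ nobrOpen <+: rest.drop j ∧ ¬ nobrClose <+: rest.drop j := by
      intro j hj
      refine ⟨?_, hmin j hj⟩
      by_cases hon : PySem.Chars.find rest nobrOpen = -1
      · exact not_prefix_drop_of_not_infix _ _ _
          ((PySem.Chars.find_eq_neg_one_iff rest nobrOpen).1 hon)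
      · have hco : PySem.Chars.find rest nobrClose ≤ PySem.Chars.find rest nobrOpen := by
          by_contra hlt
          exact h2 (Or.inr ⟨hon, by omega⟩)
        have ho0 : 0 ≤ PySem.Chars.find rest nobrOpen := by
          have := PySem.Chars.neg_one_le_find rest nobrOpen
          omega
        obtain ⟨_, hmino⟩ := PySem.Chars.find_spec (s := rest) (sub := nobrOpen) ho0
        exact hmino j (by omega)
    obtain ⟨t, ht⟩ := hpre
    have hdrop7 : rest.drop ((PySem.Chars.find rest nobrClose).toNat + 7) = t := by
      have h6 : (rest.drop (PySem.Chars.find rest nobrClose).toNat).drop 7 = t := by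
        rw [← ht]; simp [nobrClose]
      simpa [List.drop_drop, Nat.add_comm] using h6
    rw [cleanLoopA_skip (PySem.Chars.find rest nobrClose).toNat rest level hskip]
    rw [show rest.drop (PySem.Chars.find rest nobrClose).toNat = nobrClose ++ t from ht.symm,
        cleanLoopA_close, ih, hdrop7, List.append_assoc]

-- ===== VERDICT (by name: the statement is the Claim_ definition above) =====
theorem clean_nested_nobr_spec : Claim_equal_clean_nested_nobr := by
  intro text _
  unfold Spec_clean_nested_nobr clean_nested_nobr clean_nested_nobr_alt
  rw [cleanLoopB_eq]
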